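-- pv_equiv track=rewrite | github.com/gerliron18/67101-Introduction-to-Computer-Science | Ex5/crossword3d.py | txt_to_lists3d
-- ===== SOURCE A (Python) =====
-- def txt_to_lists3d(f):
--     """A function that convert 3d matrix in txt file to lists"""
--     str_words = f.split('\n')
--     new_list = []
--     inner_matrix = []
--     for i in range(len(str_words)):
--         # Run on every line at the 3d matrix txt file,
--         #  gives one line at a time
--         one_letter = list(str_words[i].split(','))
--         if str_words[i] == "***":
--             new_list.append(inner_matrix)
--             inner_matrix = []
--         elif i == len(str_words) - 1:
--             inner_matrix.append(one_letter)
--             new_list.append(inner_matrix)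
--         else:
--             inner_matrix.append(one_letter)
--     return new_list
-- ===== SOURCE B (Python) =====
-- def txt_to_lists3d(f):
--     """Convert 3d matrix txt to nested lists: group lines into segments split
--     on '***' markers, then parse each line; drops the one empty trailing
--     segment produced when the text ends with '***' (matching A)."""
--     lines = f.split('\n')
--     segments = [[]]
--     for line in lines:
--         if line == "***":
--             segments.append([])
--         else:
--             segments[-1].append(line)
--     if lines[-1] == "***":
--         segments.pop()
--     return [[line.split(',') for line in seg] for seg in segments]
-- ===== Notes on version B (the rewrite author's own statement) =====
-- stated objective: simpler
-- what changed: Two-phase decomposition: first split the line list into raw segments on '***' markers (dropping the single empty trailing segment a final '***' creates), then parse every line with a comprehension, instead of A's single indexed loop interleaving parsing, flushing and a special last-line branch.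
import Mathlib
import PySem

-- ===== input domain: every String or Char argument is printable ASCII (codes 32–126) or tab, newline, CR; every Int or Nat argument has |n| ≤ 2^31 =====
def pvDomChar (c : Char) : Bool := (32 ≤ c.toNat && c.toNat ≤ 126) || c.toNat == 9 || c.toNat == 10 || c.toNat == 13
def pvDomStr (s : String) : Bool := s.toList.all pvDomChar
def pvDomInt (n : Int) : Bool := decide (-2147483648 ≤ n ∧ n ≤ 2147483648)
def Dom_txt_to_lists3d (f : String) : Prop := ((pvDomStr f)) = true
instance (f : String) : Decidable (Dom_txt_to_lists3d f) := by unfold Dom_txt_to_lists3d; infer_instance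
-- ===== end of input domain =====

-- B re-implements A in two phases (split the line list into '***'-separated segments, then parse each
-- line) instead of A's single indexed loop with its special last-line branch; same O(n) cost, simpler.

-- s.split(sep) for a nonempty literal sep — exact via PySem.Chars.splitOn (the sep ≠ "" form of str.split)
def pySplit (s sep : String) : List String :=
  (PySem.Chars.splitOn s.toList sep.toList).map String.ofList

-- ===== PORT A =====
-- A's indexed loop, transliterated as structural recursion over the lines; `i == len-1` becomes `rest = []`.
def pvGoA : List String → List (List (List String)) → List (List String) → List (List (List String))
  | [], newList, _ => newList
  | line :: rest, newList, inner =>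
    let oneLetter := pySplit line ","
    if line == "***" then pvGoA rest (newList ++ [inner]) []
    else if rest.isEmpty then pvGoA rest (newList ++ [inner ++ [oneLetter]]) []
    else pvGoA rest newList (inner ++ [oneLetter])

def txt_to_lists3d (f : String) : List (List (List String)) :=
  pvGoA (pySplit f "\n") [] []

-- ===== PORT B =====
-- segments[-1].append(line) on a nonempty segment list
def pvAppendLast : List (List String) → String → List (List String)
  | [], _ => []
  | [s], line => [s ++ [line]]
  | s :: rest, line => s :: pvAppendLast rest line

-- the body of B's grouping loop
def pvStep (segs : List (List String)) (line : String) : List (List String) :=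
  if line == "***" then segs ++ [[]] else pvAppendLast segs line

def txt_to_lists3d_alt (f : String) : List (List (List String)) :=
  let lines := pySplit f "\n"
  let segs := lines.foldl pvStep [[]]
  let segs := if lines.getLast? = some "***" then segs.dropLast else segs  -- lines[-1]; lines is never empty
  segs.map (fun seg => seg.map (fun line => pySplit line ","))

-- ===== PRECONDITION & SPEC =====
def Spec_txt_to_lists3d (f : String) (out : List (List (List String))) : Prop := out = txt_to_lists3d_alt f
instance (f : String) (out : List (List (List String))) : Decidable (Spec_txt_to_lists3d f out) := by unfold Spec_txt_to_lists3d; infer_instance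

-- ===== CLAIM (what is proved, stated in full; the proofs are below) =====
def Claim_equal_txt_to_lists3d : Prop := ∀ (f : String), Dom_txt_to_lists3d f → Spec_txt_to_lists3d f (txt_to_lists3d f)

-- ===== LEMMAS AND PROOFS =====
theorem pvSplitOn_go_ne_nil (sep : List Char) (fuel : Nat) :
    ∀ (l cur : List Char) (acc : List (List Char)),
    PySem.Chars.splitOn.go sep fuel l cur acc ≠ [] := by
  induction fuel with
  | zero => intro l cur acc; simp [PySem.Chars.splitOn.go]
  | succ n ih =>
    intro l cur acc
    cases l with
    | nil => simp [PySem.Chars.splitOn.go]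
    | cons c rest =>
      rw [PySem.Chars.splitOn.go]
      split
      · exact ih _ _ _
      · exact ih _ _ _

theorem pySplit_ne_nil (s sep : String) : pySplit s sep ≠ [] := by
  unfold pySplit PySem.Chars.splitOn
  simp [pvSplitOn_go_ne_nil]

theorem pvAppendLast_ne_nil (segs : List (List String)) (line : String) (h : segs ≠ []) :
    pvAppendLast segs line ≠ [] := by
  cases segs with
  | nil => exact absurd rfl h
  | cons s rest => cases rest <;> simp [pvAppendLast]

theorem pvStep_ne_nil (segs : List (List String)) (line : String) (h : segs ≠ []) :
    pvStep segs line ≠ [] := by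
  unfold pvStep
  split
  · simp
  · exact pvAppendLast_ne_nil segs line h

theorem pvFoldl_step_ne_nil (lines : List String) (segs : List (List String)) (h : segs ≠ []) :
    lines.foldl pvStep segs ≠ [] := by
  induction lines generalizing segs with
  | nil => exact h
  | cons line rest ih =>
    simp only [List.foldl_cons]
    exact ih _ (pvStep_ne_nil segs line h)

theorem pvAppendLast_append (pre segs : List (List String)) (line : String) (h : segs ≠ []) :
    pvAppendLast (pre ++ segs) line = pre ++ pvAppendLast segs line := by
  induction pre with
  | nil => rfl
  | cons s pre ih =>
    cases hp : pre ++ segs with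
    | nil => exact absurd (List.append_eq_nil_iff.mp hp).2 h
    | cons a t =>
      have e : pvAppendLast ((s :: pre) ++ segs) line = s :: pvAppendLast (pre ++ segs) line := by
        rw [List.cons_append, hp]; simp [pvAppendLast]
      rw [e, ih, List.cons_append]

theorem pvStep_append (pre segs : List (List String)) (line : String) (h : segs ≠ []) :
    pvStep (pre ++ segs) line = pre ++ pvStep segs line := by
  unfold pvStep
  split
  · simp
  · exact pvAppendLast_append pre segs line h

theorem pvFoldl_step_prefix (lines : List String) (pre segs : List (List String)) (h : segs ≠ []) :
    lines.foldl pvStep (pre ++ segs) = pre ++ lines.foldl pvStep segs := by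
  induction lines generalizing segs with
  | nil => rfl
  | cons line rest ih =>
    simp only [List.foldl_cons, pvStep_append pre segs line h]
    exact ih _ (pvStep_ne_nil segs line h)

-- the core invariant: A's loop from (acc, current segment already parsed) equals B's grouping
-- started from [cur], followed by the trailing drop and the row-parsing map
theorem pvGoA_eq (lines : List String) (hne : lines ≠ []) :
    ∀ (acc : List (List (List String))) (cur : List String),
    pvGoA lines acc (cur.map (fun line => pySplit line ",")) =
      acc ++ (if lines.getLast? = some "***" then (lines.foldl pvStep [cur]).dropLast
              else lines.foldl pvStep [cur]).map
              (fun seg => seg.map (fun line => pySplit line ",")) := by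
  induction lines with
  | nil => exact absurd rfl hne
  | cons line rest ih =>
    intro acc cur
    cases rest with
    | nil =>
      by_cases h : line = "***"
      · simp [pvGoA, pvStep, h]
      · simp [pvGoA, pvStep, pvAppendLast, h]
    | cons y t =>
      have hS : (y :: t).foldl pvStep [[]] ≠ [] := pvFoldl_step_ne_nil _ _ (by simp)
      by_cases h : line = "***"
      · have e1 : pvGoA (line :: y :: t) acc (cur.map (fun line => pySplit line ",")) =
            pvGoA (y :: t) (acc ++ [cur.map (fun line => pySplit line ",")])
              (([] : List String).map (fun line => pySplit line ",")) := by
          simp [pvGoA, h]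
        have e2 : (line :: y :: t).foldl pvStep [cur] = [cur] ++ (y :: t).foldl pvStep [[]] := by
          have : pvStep [cur] line = [cur] ++ [[]] := by simp [pvStep, h]
          rw [List.foldl_cons, this]
          exact pvFoldl_step_prefix _ [cur] [[]] (by simp)
        rw [e1, ih (by simp) _ [], e2]
        simp only [List.getLast?_cons_cons]
        by_cases hc : (y :: t).getLast? = some "***"
        · rw [if_pos hc, if_pos hc, List.dropLast_append_of_ne_nil hS]
          simp
        · rw [if_neg hc, if_neg hc]
          simp
      · have e1 : pvGoA (line :: y :: t) acc (cur.map (fun line => pySplit line ",")) =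
            pvGoA (y :: t) acc ((cur ++ [line]).map (fun line => pySplit line ",")) := by
          simp [pvGoA, h]
        have e2 : (line :: y :: t).foldl pvStep [cur] = (y :: t).foldl pvStep [cur ++ [line]] := by
          have : pvStep [cur] line = [cur ++ [line]] := by simp [pvStep, pvAppendLast, h]
          rw [List.foldl_cons, this]
        rw [e1, ih (by simp) _ (cur ++ [line]), e2]
        simp only [List.getLast?_cons_cons]

-- ===== VERDICT (by name: the statement is the Claim_ definition above) =====
theorem txt_to_lists3d_spec : Claim_equal_txt_to_lists3d := by
  intro f _
  unfold Spec_txt_to_lists3d txt_to_lists3d txt_to_lists3d_alt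
  have h := pvGoA_eq (pySplit f "\n") (pySplit_ne_nil f "\n") [] []
  simpa using h
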